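-- pv_equiv track=rewrite | github.com/ryunada/Coding_Test_Practice | DUDU/Programmers/배열조각하기.py | solution
-- ===== SOURCE A (Python) =====
-- def solution(arr, query):
--     result = []
--     for i in range(len(query)):
--         if i % 2 == 0:
--             # 짝수 인덱스인 경우, query[i] 인덱스를 제외한 나머지 부분을 삭제합니다.
--             arr = arr[:query[i]+1]
--         else:
--             # 홀수 인덱스인 경우, query[i] 인덱스를 제외한 나머지 부분을 삭제합니다.
--             arr = arr[query[i]:]
--     return arr
-- ===== SOURCE B (Python) =====
-- def _clamp(L, i):
--     # Python slice-bound clamping for a list of length L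
--     if i < 0:
--         i += L
--     if i < 0:
--         return 0
--     return min(i, L)
--
--
-- def solution(arr, query):
--     lo, hi = 0, len(arr)
--     for i, q in enumerate(query):
--         L = hi - lo
--         if i % 2 == 0:
--             hi = lo + _clamp(L, q + 1)
--         else:
--             lo = lo + _clamp(L, q)
--     return arr[lo:hi]
-- ===== Notes on version B (the rewrite author's own statement) =====
-- stated objective: alternative
-- what changed: Instead of materialising a new sliced list for every query, B tracks a (lo, hi) window into the original array (emulating Python slice clamping arithmetically) and performs one final slice.
import Mathlib
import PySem

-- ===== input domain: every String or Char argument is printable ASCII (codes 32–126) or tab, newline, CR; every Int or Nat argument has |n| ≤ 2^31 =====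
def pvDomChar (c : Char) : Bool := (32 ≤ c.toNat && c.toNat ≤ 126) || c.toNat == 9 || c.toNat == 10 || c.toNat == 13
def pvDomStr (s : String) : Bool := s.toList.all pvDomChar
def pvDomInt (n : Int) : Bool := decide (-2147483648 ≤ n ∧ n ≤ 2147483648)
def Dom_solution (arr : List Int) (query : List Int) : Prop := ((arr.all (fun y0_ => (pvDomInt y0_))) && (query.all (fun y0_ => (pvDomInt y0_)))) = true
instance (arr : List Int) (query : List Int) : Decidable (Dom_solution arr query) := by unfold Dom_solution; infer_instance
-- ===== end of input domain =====

-- B replaces A's repeated list slicing with a (lo, hi) window over the original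
-- array (Python slice clamping done arithmetically) and one final slice.

-- ===== PORT A =====
-- for i in range(len(query)): arr = arr[:query[i]+1] (even i) / arr[query[i]:] (odd i)
def solution (arr : List Int) (query : List Int) : List Int :=
  (List.range query.length).foldl
    (fun a i =>
      if i % 2 == 0 then
        PySem.List.slice a none (some (query.getD i 0 + 1))
      else
        PySem.List.slice a (some (query.getD i 0)) none)
    arr

-- ===== PORT B =====
-- _clamp(L, i): Python slice-bound clamping for length L
def clampB (L : Nat) (i : Int) : Nat :=
  let i' := if i < 0 then i + L else i
  if i' < 0 then 0 else min i'.toNat L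

-- for i, q in enumerate(query): update (lo, hi)
def goB : List Int → Nat → Nat × Nat → Nat × Nat
  | [], _, p => p
  | q :: qs, i, (lo, hi) =>
      let L := hi - lo
      goB qs (i + 1)
        (if i % 2 == 0 then (lo, lo + clampB L (q + 1)) else (lo + clampB L q, hi))

def solution_alt (arr : List Int) (query : List Int) : List Int :=
  let p := goB query 0 (0, arr.length)
  (arr.drop p.1).take (p.2 - p.1)

-- ===== PRECONDITION & SPEC =====
def Spec_solution (arr : List Int) (query : List Int) (out : List Int) : Prop := out = solution_alt arr query
instance (arr : List Int) (query : List Int) (out : List Int) : Decidable (Spec_solution arr query out) := by unfold Spec_solution; infer_instance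

-- ===== CLAIM (what is proved, stated in full; the proofs are below) =====
def Claim_equal_solution : Prop := ∀ (arr : List Int) (query : List Int), Dom_solution arr query → Spec_solution arr query (solution arr query)

-- ===== LEMMAS AND PROOFS =====

-- A's fold over range(len(query)), rephrased as structural recursion with a shift
def goA : List Int → Nat → List Int → List Int
  | [], _, a => a
  | q :: qs, i, a =>
      goA qs (i + 1)
        (if i % 2 == 0 then PySem.List.slice a none (some (q + 1))
         else PySem.List.slice a (some q) none)

lemma foldA_eq_goA (qs : List Int) (j : Nat) (a : List Int) :
    (List.range qs.length).foldl
      (fun a i =>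
        if (i + j) % 2 == 0 then PySem.List.slice a none (some (qs.getD i 0 + 1))
        else PySem.List.slice a (some (qs.getD i 0)) none) a
    = goA qs j a := by
  induction qs generalizing j a with
  | nil => simp [goA]
  | cons q qs ih =>
    simp only [List.length_cons, List.range_succ_eq_map, List.foldl_cons, List.foldl_map]
    have hfun : (fun (a : List Int) (i : Nat) =>
        if (i + 1 + j) % 2 == 0 then PySem.List.slice a none (some ((q :: qs).getD (i + 1) 0 + 1))
        else PySem.List.slice a (some ((q :: qs).getD (i + 1) 0)) none)
      = (fun (a : List Int) (i : Nat) =>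
        if (i + (j + 1)) % 2 == 0 then PySem.List.slice a none (some (qs.getD i 0 + 1))
        else PySem.List.slice a (some (qs.getD i 0)) none) := by
      funext a i
      have h : i + 1 + j = i + (j + 1) := by omega
      rw [h, List.getD_cons_succ]
    rw [hfun, ih]
    simp [goA]

lemma clampB_le (L : Nat) (i : Int) : clampB L i ≤ L := by
  unfold clampB
  split_ifs <;> dsimp only <;> split <;> simp

lemma take_min_length (l : List Int) (n : Nat) : l.take (min n l.length) = l.take n := by
  by_cases h : n ≤ l.length
  · rw [Nat.min_eq_left h]
  · rw [Nat.min_eq_right (by omega), List.take_of_length_le (le_refl _),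
      List.take_of_length_le (by omega)]

-- Python slice l[:b] as take of the clamped bound
lemma slice_to_clamp (l : List Int) (b : Int) :
    PySem.List.slice l none (some b) = l.take (clampB l.length b) := by
  by_cases hb : 0 ≤ b
  · rw [PySem.List.slice_to l hb]
    unfold clampB
    have h0 : ¬ b < 0 := by omega
    simp only [h0, if_false]
    exact (take_min_length l b.toNat).symm
  · set k : Nat := (-b).toNat with hk
    have hbk : b = -(k : Int) := by omega
    have hkpos : 0 < k := by omega
    rw [hbk, PySem.List.slice_to_neg_natCast l k hkpos]
    unfold clampB
    have h1 : (-(k : Int)) < 0 := by omega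
    simp only [h1, if_true]
    by_cases h : (k : Int) ≤ (l.length : Int)
    · have h2 : ¬ (-(k : Int) + l.length < 0) := by omega
      simp only [h2, if_false]
      have ht : (-(k : Int) + l.length).toNat = l.length - k := by omega
      rw [ht, Nat.min_eq_left (Nat.sub_le _ _)]
    · have hz : l.length - k = 0 := by omega
      rw [hz]
      split
      · simp
      · have h3 : (-(k : Int) + l.length).toNat = 0 := by omega
        simp [h3]

-- Python slice l[a:] as drop of the clamped bound
lemma slice_from_clamp (l : List Int) (a : Int) :
    PySem.List.slice l (some a) none = l.drop (clampB l.length a) := by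
  rw [PySem.List.slice_some_none]
  congr 1
  by_cases ha : 0 ≤ a
  · have h : a = ((a.toNat : Nat) : Int) := by omega
    rw [h, PySem.List.clampIdx_natCast]
    unfold clampB
    have h0 : ¬ ((a.toNat : Int) < 0) := by omega
    simp only [h0, if_false]
    omega
  · set k : Nat := (-a).toNat with hk
    have hak : a = -(k : Int) := by omega
    have hkpos : 0 < k := by omega
    rw [hak, PySem.List.clampIdx_neg_natCast l.length k hkpos]
    unfold clampB
    have h1 : (-(k : Int)) < 0 := by omega
    simp only [h1, if_true]
    by_cases h : (k : Int) ≤ (l.length : Int)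
    · have h2 : ¬ (-(k : Int) + l.length < 0) := by omega
      simp only [h2, if_false]
      have ht : (-(k : Int) + l.length).toNat = l.length - k := by omega
      rw [ht, Nat.min_eq_left (Nat.sub_le _ _)]
    · have hz : l.length - k = 0 := by omega
      rw [hz]
      split
      · rfl
      · have h3 : (-(k : Int) + l.length).toNat = 0 := by omega
        simp [h3]

-- main invariant: A run on the current window = B's window arithmetic
lemma goA_eq_goB (qs : List Int) (j : Nat) (arr : List Int) (lo hi : Nat)
    (h1 : lo ≤ hi) (h2 : hi ≤ arr.length) :
    goA qs j ((arr.drop lo).take (hi - lo))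
      = ((arr.drop (goB qs j (lo, hi)).1).take ((goB qs j (lo, hi)).2 - (goB qs j (lo, hi)).1)) := by
  induction qs generalizing j lo hi with
  | nil => simp [goA, goB]
  | cons q qs ih =>
    have hlen : ((arr.drop lo).take (hi - lo)).length = hi - lo := by
      rw [List.length_take, List.length_drop]
      omega
    by_cases hpar : (j % 2 == 0) = true
    · simp only [goA, goB]
      rw [if_pos hpar, if_pos hpar]
      rw [slice_to_clamp, hlen, List.take_take, Nat.min_eq_left (clampB_le _ _)]
      have := ih (j + 1) lo (lo + clampB (hi - lo) (q + 1)) (by omega)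
        (by have := clampB_le (hi - lo) (q + 1); omega)
      simpa [Nat.add_sub_cancel_left] using this
    · simp only [goA, goB]
      rw [if_neg hpar, if_neg hpar]
      rw [slice_from_clamp, hlen, List.drop_take, List.drop_drop]
      have hc := clampB_le (hi - lo) q
      have h4 : hi - lo - clampB (hi - lo) q = hi - (lo + clampB (hi - lo) q) := by omega
      have h5 : clampB (hi - lo) q + lo = lo + clampB (hi - lo) q := by omega
      rw [h4]
      have := ih (j + 1) (lo + clampB (hi - lo) q) hi (by omega) h2
      exact this

-- ===== VERDICT (by name: the statement is the Claim_ definition above) =====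
theorem solution_spec : Claim_equal_solution := by
  intro arr query _
  unfold Spec_solution solution solution_alt
  have h0 : (List.range query.length).foldl
      (fun a i =>
        if i % 2 == 0 then PySem.List.slice a none (some (query.getD i 0 + 1))
        else PySem.List.slice a (some (query.getD i 0)) none) arr
      = goA query 0 arr := by
    have h := foldA_eq_goA query 0 arr
    simpa using h
  rw [h0]
  have h := goA_eq_goB query 0 arr 0 arr.length (Nat.zero_le _) (le_refl _)
  simpa using h
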